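-- pv_equiv track=rewrite | github.com/OElesin/Leg-R1 | src/training/trainer.py | _find_assistant_positions
-- ===== SOURCE A (Python) =====
-- from typing import Dict, List, Any, Optional, Union
--
-- def _find_assistant_positions(text: str) -> List[tuple]:
--     """Find positions of assistant responses in the text."""
--     positions = []
--     start_marker = "<|im_start|>assistant\n"
--     end_marker = "<|im_end|>"
--
--     start = 0
--     while True:
--         start_pos = text.find(start_marker, start)
--         if start_pos == -1:
--             break
--
--         start_pos += len(start_marker)
--         end_pos = text.find(end_marker, start_pos)
--
--         if end_pos == -1:
--             break
--
--         positions.append((start_pos, end_pos))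
--         start = end_pos + len(end_marker)
--
--     return positions
-- ===== SOURCE B (Python) =====
-- def _find_assistant_positions(text):
--     """Find positions of assistant responses in the text.
--
--     Alternative algorithm: precompute the sorted lists of all occurrence
--     positions of both markers in one indexed scan, then merge the two
--     position lists with a moving cursor instead of repeated text.find calls.
--     """
--     start_marker = "<|im_start|>assistant\n"
--     end_marker = "<|im_end|>"
--     starts = [i for i in range(len(text)) if text.startswith(start_marker, i)]
--     ends = [i for i in range(len(text)) if text.startswith(end_marker, i)]
--     positions = []
--     cursor = 0
--     for i in starts:
--         if i < cursor:
--             continue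
--         while ends and ends[0] < i + len(start_marker):
--             ends.pop(0)
--         if not ends:
--             break
--         positions.append((i + len(start_marker), ends[0]))
--         cursor = ends[0] + len(end_marker)
--     return positions
-- ===== Notes on version B (the rewrite author's own statement) =====
-- stated objective: alternative
-- what changed: B precomputes the sorted lists of all start-marker and end-marker occurrence positions in one indexed scan and then merges the two position lists with a moving cursor, instead of A's repeated text.find calls in a while loop.
import Mathlib
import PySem

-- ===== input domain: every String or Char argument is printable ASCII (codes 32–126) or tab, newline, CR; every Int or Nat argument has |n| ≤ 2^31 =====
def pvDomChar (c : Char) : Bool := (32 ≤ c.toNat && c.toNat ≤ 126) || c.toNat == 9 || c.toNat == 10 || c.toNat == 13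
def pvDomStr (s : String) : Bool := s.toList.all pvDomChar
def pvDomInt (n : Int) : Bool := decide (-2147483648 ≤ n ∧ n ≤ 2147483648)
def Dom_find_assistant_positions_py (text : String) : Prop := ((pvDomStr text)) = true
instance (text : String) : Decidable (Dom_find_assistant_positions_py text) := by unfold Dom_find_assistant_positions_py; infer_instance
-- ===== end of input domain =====

-- B replaces A's repeated text.find loop by precomputing the sorted occurrence-position
-- lists of both markers once and merging them with a moving cursor (objective: alternative).

def pvSM : List Char := "<|im_start|>assistant\n".toList   -- start marker, length 22
def pvEM : List Char := "<|im_end|>".toList                -- end marker, length 10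

-- ===== PORT A =====
-- A's `while True` loop as fuel recursion; the cursor `start` advances by ≥ 32 each
-- iteration, so fuel = text.length + 1 is always enough.
-- text.find(marker, start) is PySem.Chars.findFrom on text.toList (= PySem.Str.findFrom).
def pvGoA (t : List Char) (fuel : Nat) (start : Int) : List (Int × Int) :=
  match fuel with
  | 0 => []
  | fuel + 1 =>
    let sp0 := PySem.Chars.findFrom t pvSM start none
    if sp0 = -1 then []
    else
      let sp := sp0 + 22                                  -- start_pos += len(start_marker)
      let ep := PySem.Chars.findFrom t pvEM sp none
      if ep = -1 then []
      else (sp, ep) :: pvGoA t fuel (ep + 10)             -- start = end_pos + len(end_marker)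

def find_assistant_positions_py (text : String) : List (Int × Int) :=
  pvGoA text.toList (text.toList.length + 1) 0

-- ===== PORT B =====
-- text.startswith(marker, i) for 0 ≤ i ≤ len(text) is exactly startswith on the drop.
def pvOccs (t : List Char) (sub : List Char) : List Nat :=
  (List.range t.length).filter (fun i => PySem.Chars.startswith (t.drop i) sub)

-- the `for i in starts` merge loop of Source B; `ends.pop(0)` while head < i + 22 is dropWhile
def pvGoB (starts ends : List Nat) (cursor : Nat) : List (Int × Int) :=
  match starts with
  | [] => []
  | st :: rest =>
    if st < cursor then pvGoB rest ends cursor            -- continue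
    else
      match ends.dropWhile (fun e => decide (e < st + 22)) with
      | [] => []                                          -- break: ends exhausted
      | e :: es => ((st + 22 : Nat), (e : Nat)) :: pvGoB rest (e :: es) (e + 10)

def find_assistant_positions_py_alt (text : String) : List (Int × Int) :=
  pvGoB (pvOccs text.toList pvSM) (pvOccs text.toList pvEM) 0

-- ===== PRECONDITION & SPEC =====
def Spec_find_assistant_positions_py (text : String) (out : List (Int × Int)) : Prop := out = find_assistant_positions_py_alt text
instance (text : String) (out : List (Int × Int)) : Decidable (Spec_find_assistant_positions_py text out) := by unfold Spec_find_assistant_positions_py; infer_instance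

-- ===== CLAIM (what is proved, stated in full; the proofs are below) =====
def Claim_equal_find_assistant_positions_py : Prop := ∀ (text : String), Dom_find_assistant_positions_py text → Spec_find_assistant_positions_py text (find_assistant_positions_py text)

-- ===== LEMMAS AND PROOFS =====

theorem pvSM_len : pvSM.length = 22 := rfl
theorem pvEM_len : pvEM.length = 10 := rfl

-- findFrom returns -1 when no occurrence at an index ≥ k exists
theorem pv_findFrom_none (t sub : List Char) (k : Nat) (hk : k ≤ t.length)
    (h : ∀ i, k ≤ i → ¬ sub <+: t.drop i) :
    PySem.Chars.findFrom t sub (k : Int) none = -1 := by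
  rw [PySem.Chars.findFrom_natCast_eq_neg_one_iff t sub k hk]
  intro hinf
  have : ∃ j, sub <+: (t.drop k).drop j :=
    (PySem.Chars.exists_prefix_drop_iff_isIn sub (t.drop k)).mpr
      ((PySem.Chars.isIn_iff_infix sub (t.drop k)).mpr hinf)
  obtain ⟨j, hj⟩ := this
  rw [List.drop_drop] at hj
  exact h (k + j) (by omega) (by rwa [Nat.add_comm k j] at hj ⊢)

-- findFrom returns the first occurrence at an index ≥ k
theorem pv_findFrom_first (t sub : List Char) (k e : Nat) (hk : k ≤ t.length)
    (he : sub <+: t.drop e) (hke : k ≤ e)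
    (hmin : ∀ i, k ≤ i → i < e → ¬ sub <+: t.drop i) :
    PySem.Chars.findFrom t sub (k : Int) none = (e : Int) := by
  have hne : PySem.Chars.findFrom t sub (k : Int) none ≠ -1 := by
    intro hcon
    rw [PySem.Chars.findFrom_natCast_eq_neg_one_iff t sub k hk] at hcon
    apply hcon
    have : sub <+: (t.drop k).drop (e - k) := by
      rw [List.drop_drop]
      have : k + (e - k) = e := by omega
      rw [this]; exact he
    exact ((PySem.Chars.isIn_iff_infix sub (t.drop k)).mp
      ((PySem.Chars.exists_prefix_drop_iff_isIn sub (t.drop k)).mp ⟨e - k, this⟩))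
  obtain ⟨hkf, hpre, hfmin⟩ := PySem.Chars.findFrom_natCast_spec t sub k hk hne
  set f := PySem.Chars.findFrom t sub (k : Int) none with hf
  have h0f : 0 ≤ f := le_trans (by exact_mod_cast Int.natCast_nonneg k) hkf
  have hkn : k ≤ f.toNat := by omega
  have : f.toNat = e := by
    rcases lt_trichotomy f.toNat e with h | h | h
    · exact absurd hpre (hmin f.toNat hkn h)
    · exact h
    · exact absurd he (hfmin e hke h)
  omega

theorem pv_dropWhile_head_false {α : Type} (p : α → Bool) (l : List α) (x : α) (xs : List α)
    (h : l.dropWhile p = x :: xs) : p x = false := by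
  induction l with
  | nil => simp [List.dropWhile] at h
  | cons a as ih =>
    by_cases hp : p a
    · rw [List.dropWhile_cons_of_pos hp] at h; exact ih h
    · rw [List.dropWhile_cons_of_neg hp] at h
      cases h; simpa using hp

-- main invariant lemma: A's find loop equals B's merge loop
theorem pv_main (t : List Char) (S : List Nat) :
    ∀ (E : List Nat) (c fuel : Nat),
    S.length + 1 ≤ fuel → c ≤ t.length →
    S.Pairwise (· < ·) →
    (∀ i ∈ S, pvSM <+: t.drop i) →
    (∀ i, c ≤ i → pvSM <+: t.drop i → i ∈ S) →
    E.Pairwise (· < ·) →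
    (∀ e ∈ E, pvEM <+: t.drop e) →
    (∀ e, c ≤ e → pvEM <+: t.drop e → e ∈ E) →
    pvGoA t fuel (c : Int) = pvGoB S E c := by
  induction S with
  | nil =>
    intro E c fuel hfuel hc _ _ hScomp _ _ _
    obtain ⟨f, rfl⟩ : ∃ f, fuel = f + 1 := ⟨fuel - 1, by omega⟩
    have : PySem.Chars.findFrom t pvSM (c : Int) none = -1 :=
      pv_findFrom_none t pvSM c hc (fun i hi hocc => (List.not_mem_nil (hScomp i hi hocc)))
    simp [pvGoA, pvGoB, this]
  | cons st rest ih =>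
    intro E c fuel hfuel hc hSsort hSocc hScomp hEsort hEocc hEcomp
    by_cases hst : st < c
    · rw [show pvGoB (st :: rest) E c = pvGoB rest E c by simp [pvGoB, hst]]
      exact ih E c fuel (by simp at hfuel ⊢; omega) hc hSsort.of_cons
        (fun i hi => hSocc i (List.mem_cons_of_mem _ hi))
        (fun i hi hocc => by
          rcases List.mem_cons.mp (hScomp i hi hocc) with h | h
          · omega
          · exact h)
        hEsort hEocc hEcomp
    · have hcle : c ≤ st := by omega
      have hoccst : pvSM <+: t.drop st := hSocc st (List.mem_cons_self)
      have hstlen : st + 22 ≤ t.length := by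
        have := hoccst.length_le
        rw [pvSM_len, List.length_drop] at this; omega
      have hrest_gt : ∀ i ∈ rest, st < i := fun i hi => (List.pairwise_cons.mp hSsort).1 i hi
      have hfind : PySem.Chars.findFrom t pvSM (c : Int) none = (st : Int) :=
        pv_findFrom_first t pvSM c st hc hoccst hcle (fun i hi hlt hocc => by
          rcases List.mem_cons.mp (hScomp i hi hocc) with h | h
          · omega
          · exact absurd hlt (by have := hrest_gt i h; omega))
      obtain ⟨f, rfl⟩ : ∃ f, fuel = f + 1 := ⟨fuel - 1, by omega⟩
      have hEsplit := List.takeWhile_append_dropWhile (p := fun e => decide (e < st + 22)) (l := E)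
      cases hE' : E.dropWhile (fun e => decide (e < st + 22)) with
      | nil =>
        have hnone : PySem.Chars.findFrom t pvEM ((st : Int) + 22) none = -1 := by
          have : ((st : Int) + 22) = ((st + 22 : Nat) : Int) := by push_cast; ring
          rw [this]
          apply pv_findFrom_none t pvEM (st + 22) hstlen
          intro i hi hocc
          have hiE : i ∈ E := hEcomp i (by omega) hocc
          have : i ∈ E.takeWhile (fun e => decide (e < st + 22)) := by
            rw [← hEsplit] at hiE
            rcases List.mem_append.mp hiE with h | h
            · exact h
            · rw [hE'] at h; exact absurd h (List.not_mem_nil)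
          have := List.mem_takeWhile_imp this
          simp at this; omega
        simp [pvGoA, pvGoB, hfind, hst, hE', hnone]
      | cons e es =>
        have heE' : e ∈ E.dropWhile (fun x => decide (x < st + 22)) := by
          rw [hE']; exact List.mem_cons_self
        have heE : e ∈ E := (List.dropWhile_sublist _).subset heE'
        have hocce : pvEM <+: t.drop e := hEocc e heE
        have helen : e + 10 ≤ t.length := by
          have := hocce.length_le
          rw [pvEM_len, List.length_drop] at this; omega
        have hege : st + 22 ≤ e := by
          have := pv_dropWhile_head_false _ E e es hE'
          simp at this; omega
        have hE'sort : (e :: es).Pairwise (· < ·) := by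
          rw [← hE']; exact hEsort.sublist (List.dropWhile_sublist _)
        have hes_gt : ∀ i ∈ es, e < i := fun i hi => (List.pairwise_cons.mp hE'sort).1 i hi
        have hmemE' : ∀ i, st + 22 ≤ i → i ∈ E → i ∈ (e :: es) := by
          intro i hi hiE
          rw [← hEsplit] at hiE
          rcases List.mem_append.mp hiE with h | h
          · have := List.mem_takeWhile_imp h; simp at this; omega
          · rw [hE'] at h; exact h
        have hfind2 : PySem.Chars.findFrom t pvEM ((st : Int) + 22) none = (e : Int) := by
          have hcast : ((st : Int) + 22) = ((st + 22 : Nat) : Int) := by push_cast; ring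
          rw [hcast]
          apply pv_findFrom_first t pvEM (st + 22) e hstlen hocce hege
          intro i hi hlt hocc
          have hiE : i ∈ E := hEcomp i (by omega) hocc
          rcases List.mem_cons.mp (hmemE' i hi hiE) with h | h
          · omega
          · exact absurd hlt (by have := hes_gt i h; omega)
        have hrec : pvGoA t f ((e : Int) + 10) = pvGoB rest (e :: es) (e + 10) := by
          have hcast : ((e : Int) + 10) = ((e + 10 : Nat) : Int) := by push_cast; ring
          rw [hcast]
          apply ih (e :: es) (e + 10) f (by simp at hfuel ⊢; omega) helen
            hSsort.of_cons
            (fun i hi => hSocc i (List.mem_cons_of_mem _ hi))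
            (fun i hi hocc => by
              rcases List.mem_cons.mp (hScomp i (by omega) hocc) with h | h
              · omega
              · exact h)
            hE'sort
            (fun x hx => hEocc x ((List.dropWhile_sublist _).subset (by rw [hE']; exact hx)))
            (fun x hx hocc => hmemE' x (by omega) (hEcomp x (by omega) hocc))
        simp only [pvGoA, pvGoB, hfind, hE']
        have h1 : ¬ ((st : Int) = -1) := by omega
        have h2 : ¬ ((e : Int) = -1) := by omega
        simp only [hst, if_neg h1, hfind2, if_neg h2, hrec]
        norm_num

theorem pv_mem_occs (t sub : List Char) (i : Nat) :
    i ∈ pvOccs t sub ↔ i < t.length ∧ sub <+: t.drop i := by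
  simp [pvOccs, List.mem_filter, List.mem_range, PySem.Chars.startswith_iff]

-- ===== VERDICT (by name: the statement is the Claim_ definition above) =====
theorem find_assistant_positions_py_spec : Claim_equal_find_assistant_positions_py := by
  intro text _
  unfold Spec_find_assistant_positions_py find_assistant_positions_py find_assistant_positions_py_alt
  set t := text.toList
  have h := pv_main t (pvOccs t pvSM) (pvOccs t pvEM) 0 (t.length + 1)
    (by have := List.length_filter_le (fun i => PySem.Chars.startswith (t.drop i) pvSM) (List.range t.length)
        simp [pvOccs] at this ⊢; omega)
    (by omega)
    ((List.pairwise_lt_range).filter _)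
    (fun i hi => ((pv_mem_occs t pvSM i).mp hi).2)
    (fun i _ hocc => (pv_mem_occs t pvSM i).mpr
      ⟨by have := hocc.length_le; rw [pvSM_len, List.length_drop] at this; omega, hocc⟩)
    ((List.pairwise_lt_range).filter _)
    (fun e he => ((pv_mem_occs t pvEM e).mp he).2)
    (fun e _ hocc => (pv_mem_occs t pvEM e).mpr
      ⟨by have := hocc.length_le; rw [pvEM_len, List.length_drop] at this; omega, hocc⟩)
  simpa using h
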